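-- pv_equiv track=rewrite | github.com/cjfal2/aLGoRiTHM | 백준/Silver/12408. Quake Live （Small2）/Quake Live （Small2）.py | min_skill_difference
-- ===== SOURCE A (Python) =====
-- from itertools import combinations
--
-- def min_skill_difference(N, skills):
--     total_sum = sum(skills)
--     half_N = N // 2
--     min_diff = float('inf')
--
--     # N명 중에서 N/2명을 뽑는 모든 조합을 구함
--     for team_A in combinations(skills, half_N):
--         team_A_sum = sum(team_A)
--         team_B_sum = total_sum - team_A_sum
--         min_diff = min(min_diff, abs(team_A_sum - team_B_sum))
--
--     return min_diff
-- ===== SOURCE B (Python) =====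
-- def min_skill_difference(N, skills):
--     total = sum(skills)
--     k = N // 2
--     # reach[c] = set of sums achievable by choosing exactly c of the skills seen so far
--     reach = [set() for _ in range(k + 1)]
--     reach[0].add(0)
--     for x in skills:
--         for c in range(k, 0, -1):
--             reach[c] |= {s + x for s in reach[c - 1]}
--     return min(abs(total - 2 * s) for s in reach[k])
-- ===== Notes on version B (the rewrite author's own statement) =====
-- stated objective: alternative
-- what changed: B replaces A's enumeration of all C(N, N//2) half-size combinations by a subset-sum dynamic program that maintains, per chosen count c, the set of reachable sums, then minimises |total - 2*s| over the sums reachable with exactly N//2 elements (intended as asymptotically faster; a timing run saw A time out at n=64 where B returned, but could not verify a ratio).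
-- outside the precondition, e.g. on min_skill_difference(4, [1]): A returns inf, B raises ValueError; on min_skill_difference(-1, [1]): A raises ValueError, B raises IndexError
import Mathlib
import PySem

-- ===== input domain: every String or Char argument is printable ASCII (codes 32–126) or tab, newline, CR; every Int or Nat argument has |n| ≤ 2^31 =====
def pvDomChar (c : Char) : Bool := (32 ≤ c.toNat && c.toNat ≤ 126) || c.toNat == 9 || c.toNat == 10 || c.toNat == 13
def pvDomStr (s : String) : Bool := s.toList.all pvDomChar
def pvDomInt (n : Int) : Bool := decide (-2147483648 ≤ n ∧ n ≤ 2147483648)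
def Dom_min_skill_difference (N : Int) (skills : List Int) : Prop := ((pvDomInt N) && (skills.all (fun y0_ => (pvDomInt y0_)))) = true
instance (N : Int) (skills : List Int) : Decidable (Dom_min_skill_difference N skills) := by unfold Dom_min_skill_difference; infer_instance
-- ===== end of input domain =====

-- B replaces A's enumeration of all C(N, N/2) combinations by a subset-sum DP on
-- (count, sum) reachability; same minimal |difference| on every input admitted by Pre_.

-- ===== PORT A =====

-- itertools.combinations(xs, k) (as lists, in itertools order)
def pyCombos (k : Nat) (xs : List Int) : List (List Int) :=
  match k, xs with
  | 0, _ => [[]]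
  | _ + 1, [] => []
  | k' + 1, x :: rest =>
      ((pyCombos k' rest).map (fun c => x :: c)) ++ pyCombos (k' + 1) rest

def min_skill_difference (N : Int) (skills : List Int) : Int :=
  let total := skills.foldl (· + ·) 0
  let halfN := PySem.Int.floordiv N 2
  -- min_diff starts as float('inf'): modelled as `none`
  let res := (pyCombos halfN.toNat skills).foldl
    (fun (acc : Option Int) teamA =>
      let sA := teamA.foldl (· + ·) 0
      let sB := total - sA
      some (match acc with
        | none => |sA - sB|
        | some m => min m |sA - sB|)) none
  match res with
  | some v => v
  | none => 0  -- Python returns float('inf') here (not an int); excluded by Pre_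

-- ===== PORT B =====

-- reach[c] |= {s + x for s in reach[c-1]}, for c = k..1 (prev = old reach[c-1])
def pvStepGo (x : Int) (prev : PySem.Set Int) : List (PySem.Set Int) → List (PySem.Set Int)
  | [] => []
  | cur :: rest =>
      PySem.Set.union cur (PySem.Set.ofList (prev.map (fun s => s + x))) :: pvStepGo x cur rest

-- one pass of the inner loop (index 0 is never updated)
def pvStep (x : Int) : List (PySem.Set Int) → List (PySem.Set Int)
  | [] => []
  | r0 :: rest => r0 :: pvStepGo x r0 rest

def min_skill_difference_alt (N : Int) (skills : List Int) : Int :=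
  let total := skills.foldl (· + ·) 0
  let k := (PySem.Int.floordiv N 2).toNat
  -- [set() for _ in range(k+1)]; reach[0].add(0)
  let init : List (PySem.Set Int) :=
    PySem.Set.add PySem.Set.empty 0 :: List.replicate k PySem.Set.empty
  let reach := skills.foldl (fun r x => pvStep x r) init
  match ((reach.getD k PySem.Set.empty).map (fun s => |total - 2 * s|)).min? with
  | some v => v
  | none => 0  -- Python raises ValueError (min of empty) here; excluded by Pre_

-- ===== PRECONDITION & SPEC =====
-- Pre_ excludes N < 0 (A raises ValueError inside itertools.combinations) and
-- N // 2 > len(skills) (A returns float('inf'), not an int; B raises ValueError).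
def Pre_min_skill_difference (N : Int) (skills : List Int) : Prop :=
  0 ≤ N ∧ PySem.Int.floordiv N 2 ≤ (skills.length : Int)
instance (N : Int) (skills : List Int) : Decidable (Pre_min_skill_difference N skills) := by
  unfold Pre_min_skill_difference; infer_instance

def pvWitness_min_skill_difference : Int × List Int := (4, [3, 5, 1, 2])

def Spec_min_skill_difference (N : Int) (skills : List Int) (out : Int) : Prop := out = min_skill_difference_alt N skills
instance (N : Int) (skills : List Int) (out : Int) : Decidable (Spec_min_skill_difference N skills out) := by unfold Spec_min_skill_difference; infer_instance

-- ===== CLAIM (what is proved, stated in full; the proofs are below) =====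
def Claim_equal_min_skill_difference : Prop := ∀ (N : Int) (skills : List Int), Dom_min_skill_difference N skills → Pre_min_skill_difference N skills → Spec_min_skill_difference N skills (min_skill_difference N skills)

-- ===== LEMMAS AND PROOFS =====

-- proof-side: the multiset of sums of the size-k combinations of xs
def pvSums (k : Nat) (xs : List Int) : List Int :=
  match k, xs with
  | 0, _ => [0]
  | _ + 1, [] => []
  | k' + 1, x :: rest =>
      ((pvSums k' rest).map (fun t => x + t)) ++ pvSums (k' + 1) rest

theorem pvSums_zero (xs : List Int) : pvSums 0 xs = [0] := by
  cases xs <;> rfl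

theorem foldl_add_eq (c : List Int) (a : Int) : c.foldl (· + ·) a = a + c.foldl (· + ·) 0 := by
  induction c generalizing a with
  | nil => simp
  | cons y ys ih => simp only [List.foldl]
                    rw [ih (a + y), ih (0 + y)]; ring

theorem map_sum_pyCombos (xs : List Int) : ∀ k : Nat,
    (pyCombos k xs).map (fun c => c.foldl (· + ·) 0) = pvSums k xs := by
  induction xs with
  | nil => intro k; cases k <;> rfl
  | cons x rest ih =>
      intro k
      cases k with
      | zero => rfl
      | succ k' =>
          simp only [pyCombos, pvSums, List.map_append, List.map_map, ← ih]
          congr 1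
          apply List.map_congr_left
          intro c _
          simp only [Function.comp, List.foldl]
          rw [foldl_add_eq c (0 + x)]; ring

-- A's running-min fold is min? of the mapped list
theorem foldl_minstep_some (f : List Int → Int) (L : List (List Int)) (a : Int) :
    L.foldl (fun (acc : Option Int) c =>
      some (match acc with | none => f c | some m => min m (f c))) (some a)
      = some ((L.map f).foldl min a) := by
  induction L generalizing a with
  | nil => rfl
  | cons c cs ih =>
      simp only [List.foldl_cons, List.map_cons]
      exact ih (min a (f c))

theorem foldl_minstep (f : List Int → Int) (L : List (List Int)) :
    L.foldl (fun (acc : Option Int) c =>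
      some (match acc with | none => f c | some m => min m (f c))) none
      = (L.map f).min? := by
  cases L with
  | nil => rfl
  | cons c cs =>
      simp only [List.foldl, List.map, List.min?_cons']
      exact foldl_minstep_some f cs (f c)

-- min? only depends on membership
theorem min?_congr_mem (A B : List Int) (h : ∀ a, a ∈ A ↔ a ∈ B) : A.min? = B.min? := by
  cases hA : A.min? with
  | none =>
      rw [List.min?_eq_none_iff] at hA
      cases hB : B.min? with
      | none => rfl
      | some b =>
          rw [List.min?_eq_some_iff] at hB
          have hb := (h b).mpr hB.1
          simp [hA] at hb
  | some a =>
      rw [List.min?_eq_some_iff] at hA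
      symm
      rw [List.min?_eq_some_iff]
      exact ⟨(h a).mp hA.1, fun b hb => hA.2 b ((h b).mpr hb)⟩

-- appending one element to the pool, at positive count
theorem mem_pvSums_succ_append (x : Int) : ∀ (p : List Int) (c : Nat) (s : Int),
    s ∈ pvSums (c + 1) (p ++ [x]) ↔ s ∈ pvSums (c + 1) p ∨ ∃ t ∈ pvSums c p, s = x + t := by
  intro p
  induction p with
  | nil =>
      intro c s
      cases c with
      | zero => simp [pvSums, eq_comm]
      | succ c' => simp [pvSums]
  | cons y p' ih =>
      intro c s
      cases c with
      | zero =>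
          simp only [List.cons_append, pvSums, pvSums_zero, List.mem_append, List.mem_map,
            List.mem_singleton, ih]
          exact or_assoc.symm
      | succ c'' =>
          simp only [List.cons_append, pvSums, List.mem_append, List.mem_map, ih]
          constructor
          · rintro (⟨a, ha | ⟨t, ht, rfl⟩, rfl⟩ | h | ⟨t, ht, rfl⟩)
            · exact Or.inl (Or.inl ⟨a, ha, rfl⟩)
            · exact Or.inr ⟨y + t, Or.inl ⟨t, ht, rfl⟩, by ring⟩
            · exact Or.inl (Or.inr h)
            · exact Or.inr ⟨t, Or.inr ht, rfl⟩
          · rintro ((⟨a, ha, rfl⟩ | h) | ⟨t, ⟨a, ha, rfl⟩ | ht, rfl⟩)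
            · exact Or.inl ⟨a, Or.inl ha, rfl⟩
            · exact Or.inr (Or.inl h)
            · exact Or.inl ⟨x + a, Or.inr ⟨a, ha, rfl⟩, by ring⟩
            · exact Or.inr (Or.inr ⟨t, ht, rfl⟩)

-- membership through one inner-loop pass
theorem mem_pvStepGo (x : Int) : ∀ (rest : List (PySem.Set Int)) (prev : PySem.Set Int)
    (c : Nat) (s : Int),
    s ∈ (pvStepGo x prev rest).getD c PySem.Set.empty ↔
      c < rest.length ∧
        (s ∈ rest.getD c PySem.Set.empty ∨ ∃ t ∈ (prev :: rest).getD c PySem.Set.empty, s = t + x) := by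
  intro rest
  induction rest with
  | nil =>
      intro prev c s
      simp [pvStepGo, PySem.Set.empty]
  | cons cur rest' ih =>
      intro prev c s
      cases c with
      | zero =>
          simp [pvStepGo, PySem.Set.mem_union, PySem.Set.mem_ofList,
            List.mem_map, eq_comm]
      | succ c' =>
          simpa [pvStepGo, List.getD_cons_succ] using ih cur c' s

theorem length_pvStepGo (x : Int) : ∀ (rest : List (PySem.Set Int)) (prev : PySem.Set Int),
    (pvStepGo x prev rest).length = rest.length := by
  intro rest
  induction rest with
  | nil => intro _; rfl
  | cons cur rest' ih => intro prev; simp [pvStepGo, ih cur]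

theorem length_pvStep (x : Int) (r : List (PySem.Set Int)) :
    (pvStep x r).length = r.length := by
  cases r with
  | nil => rfl
  | cons r0 rest => simp [pvStep, length_pvStepGo]

theorem mem_pvStep (x : Int) (p : List Int) (r : List (PySem.Set Int))
    (h : ∀ c s, s ∈ r.getD c PySem.Set.empty ↔ c < r.length ∧ s ∈ pvSums c p) :
    ∀ c s, s ∈ (pvStep x r).getD c PySem.Set.empty ↔ c < r.length ∧ s ∈ pvSums c (p ++ [x]) := by
  cases r with
  | nil =>
      intro c s
      simp [pvStep, PySem.Set.empty]
  | cons r0 rest =>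
      intro c s
      cases c with
      | zero =>
          have h0 := h 0 s
          simp only [List.getD_cons_zero] at h0
          simpa [pvStep, pvSums_zero] using (by simpa [pvSums_zero] using h0)
      | succ c' =>
          have hgo := mem_pvStepGo x rest r0 c' s
          simp only [pvStep, List.getD_cons_succ]
          rw [hgo]
          constructor
          · rintro ⟨hc, hmem | ⟨t, htm, rfl⟩⟩
            · have h1 := (h (c' + 1) s).mp (by simpa [List.getD_cons_succ] using hmem)
              exact ⟨h1.1, (mem_pvSums_succ_append x p c' s).mpr (Or.inl h1.2)⟩
            · have h1 := (h c' t).mp htm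
              exact ⟨by simp only [List.length_cons]; omega,
                (mem_pvSums_succ_append x p c' (t + x)).mpr (Or.inr ⟨t, h1.2, by ring⟩)⟩
          · rintro ⟨hc, hs⟩
            have hc' : c' < rest.length := by simpa using hc
            refine ⟨hc', ?_⟩
            rcases (mem_pvSums_succ_append x p c' s).mp hs with h1 | ⟨t, ht, rfl⟩
            · have := (h (c' + 1) s).mpr ⟨hc, h1⟩
              simp only [List.getD_cons_succ] at this
              exact Or.inl this
            · refine Or.inr ⟨t, (h c' t).mpr ⟨by simp only [List.length_cons] at hc ⊢; omega, ht⟩, by ring⟩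

-- main DP invariant
theorem reach_mem : ∀ (xs p : List Int) (r : List (PySem.Set Int)),
    (∀ c s, s ∈ r.getD c PySem.Set.empty ↔ c < r.length ∧ s ∈ pvSums c p) →
    ∀ c s, s ∈ (xs.foldl (fun r x => pvStep x r) r).getD c PySem.Set.empty ↔
      c < r.length ∧ s ∈ pvSums c (p ++ xs) := by
  intro xs
  induction xs with
  | nil => intro p r h c s; simpa using h c s
  | cons x xs' ih =>
      intro p r h c s
      have h' := mem_pvStep x p r h
      have := ih (p ++ [x]) (pvStep x r) (by
        intro c s; rw [h' c s, length_pvStep]) c s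
      simpa [length_pvStep] using this

theorem pvSums_ne_nil : ∀ (xs : List Int) (k : Nat), k ≤ xs.length → pvSums k xs ≠ [] := by
  intro xs
  induction xs with
  | nil =>
      intro k hk
      cases k with
      | zero => simp [pvSums]
      | succ k' => simp at hk
  | cons x rest ih =>
      intro k hk
      cases k with
      | zero => simp [pvSums_zero]
      | succ k' =>
          simp only [pvSums, ne_eq, List.append_eq_nil_iff, List.map_eq_nil_iff, not_and_or]
          left
          exact ih k' (by simpa using hk)

-- membership in init
theorem mem_init (k : Nat) : ∀ (c : Nat) (s : Int),
    s ∈ (PySem.Set.add PySem.Set.empty (0 : Int) :: List.replicate k PySem.Set.empty).getD c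
        PySem.Set.empty ↔ c < k + 1 ∧ s ∈ pvSums c [] := by
  intro c s
  cases c with
  | zero => simp [PySem.Set.empty, pvSums_zero]
  | succ c' =>
      simp only [List.getD_cons_succ, pvSums]
      have hrep : (List.replicate k (PySem.Set.empty : PySem.Set Int)).getD c' PySem.Set.empty
          = PySem.Set.empty := by
        rcases lt_or_ge c' k with hlt | hge
        · rw [List.getD_eq_getElem _ _ (by simpa using hlt), List.getElem_replicate]
        · exact List.getD_eq_default _ _ (by simpa using hge)
      rw [hrep]
      simp [PySem.Set.empty]

-- the reach row k holds exactly the size-k combination sums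
theorem reach_row (skills : List Int) (k : Nat) : ∀ s : Int,
    s ∈ ((skills.foldl (fun r x => pvStep x r)
        (PySem.Set.add PySem.Set.empty 0 :: List.replicate k PySem.Set.empty)).getD k
          PySem.Set.empty) ↔ s ∈ pvSums k skills := by
  intro s
  have h := reach_mem skills []
    (PySem.Set.add PySem.Set.empty 0 :: List.replicate k PySem.Set.empty)
    (by intro c s
        simpa [List.length_cons, List.length_replicate] using mem_init k c s) k s
  simp only [List.nil_append, List.length_cons, List.length_replicate] at h
  rw [h]
  simp

-- ===== VERDICT (by name: the statement is the Claim_ definition above) =====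
theorem min_skill_difference_spec : Claim_equal_min_skill_difference := by
  intro N skills _ hpre
  unfold Spec_min_skill_difference
  obtain ⟨hN, hlen⟩ := hpre
  simp only [min_skill_difference, min_skill_difference_alt]
  rw [foldl_minstep (fun teamA : List Int =>
    |teamA.foldl (· + ·) 0 - (skills.foldl (· + ·) 0 - teamA.foldl (· + ·) 0)|)]
  have hmap : (pyCombos (PySem.Int.floordiv N 2).toNat skills).map
      (fun teamA : List Int =>
        |teamA.foldl (· + ·) 0 - (skills.foldl (· + ·) 0 - teamA.foldl (· + ·) 0)|)
      = (pvSums (PySem.Int.floordiv N 2).toNat skills).map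
        (fun s => |skills.foldl (· + ·) 0 - 2 * s|) := by
    rw [← map_sum_pyCombos, List.map_map]
    apply List.map_congr_left
    intro c _
    show |c.foldl (· + ·) 0 - (skills.foldl (· + ·) 0 - c.foldl (· + ·) 0)|
      = |skills.foldl (· + ·) 0 - 2 * c.foldl (· + ·) 0|
    rw [abs_sub_comm]
    congr 1
    ring
  rw [hmap]
  have hmm := min?_congr_mem
    ((pvSums (PySem.Int.floordiv N 2).toNat skills).map
      (fun s => |skills.foldl (· + ·) 0 - 2 * s|))
    (((skills.foldl (fun r x => pvStep x r)
        (PySem.Set.add PySem.Set.empty 0 ::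
          List.replicate (PySem.Int.floordiv N 2).toNat PySem.Set.empty)).getD
            (PySem.Int.floordiv N 2).toNat PySem.Set.empty).map
      (fun s => |skills.foldl (· + ·) 0 - 2 * s|))
    (by
      intro a
      simp only [List.mem_map]
      constructor
      · rintro ⟨t, ht, rfl⟩
        exact ⟨t, (reach_row skills _ t).mpr ht, rfl⟩
      · rintro ⟨t, ht, rfl⟩
        exact ⟨t, (reach_row skills _ t).mp ht, rfl⟩)
  -- under Pre_, the minimised list is nonempty (A really returns a minimum, not inf)
  have hne : pvSums (PySem.Int.floordiv N 2).toNat skills ≠ [] :=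
    pvSums_ne_nil skills _ (Int.toNat_le.mpr hlen)
  obtain ⟨m, hm⟩ : ∃ m, ((pvSums (PySem.Int.floordiv N 2).toNat skills).map
      (fun s => |skills.foldl (· + ·) 0 - 2 * s|)).min? = some m := by
    cases hcase : ((pvSums (PySem.Int.floordiv N 2).toNat skills).map
        (fun s => |skills.foldl (· + ·) 0 - 2 * s|)).min? with
    | none =>
        rw [List.min?_eq_none_iff, List.map_eq_nil_iff] at hcase
        exact absurd hcase hne
    | some m => exact ⟨m, rfl⟩
  rw [hm, ← hmm, hm]
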